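-- pv_equiv track=rewrite | github.com/annienar/Plan-Mensual-Comidas | scripts/development/update_imports.py | _find_import_blocks
-- ===== SOURCE A (Python) =====
-- from typing import Dict, List, Set, Tuple, Optional
--
-- def _find_import_blocks(lines: List[str]) -> List[Dict]:
--     """Find blocks of consecutive import statements."""
--     blocks = []
--     in_block = False
--     block_start = None
--
--     for i, line in enumerate(lines):
--         is_import_line = (line.strip().startswith('import ') or
--                         line.strip().startswith('from '))
--
--         if is_import_line and not in_block:
--             in_block = True
--             block_start = i
--         elif not is_import_line and in_block:
--             blocks.append({'start': block_start, 'end': i})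
--             in_block = False
--
--     # Handle case where file ends with imports
--     if in_block:
--         blocks.append({'start': block_start, 'end': len(lines)})
--
--     return blocks
-- ===== SOURCE B (Python) =====
-- from itertools import groupby
-- from typing import Dict, List
--
-- def _find_import_blocks(lines: List[str]) -> List[Dict]:
--     """Find blocks of consecutive import statements (run-grouping version)."""
--     flags = [line.strip().startswith(('import ', 'from ')) for line in lines]
--     blocks = []
--     pos = 0
--     for key, group in groupby(flags):
--         n = len(list(group))
--         if key:
--             blocks.append({'start': pos, 'end': pos + n})
--         pos += n
--     return blocks
-- ===== Notes on version B (the rewrite author's own statement) =====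
-- stated objective: alternative
-- what changed: Replaces the transition-detecting state machine (in_block/block_start flags plus an end-of-file tail case) with a predicate list grouped into contiguous runs via itertools.groupby, emitting one block per True run while advancing a running position.
import Mathlib
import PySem

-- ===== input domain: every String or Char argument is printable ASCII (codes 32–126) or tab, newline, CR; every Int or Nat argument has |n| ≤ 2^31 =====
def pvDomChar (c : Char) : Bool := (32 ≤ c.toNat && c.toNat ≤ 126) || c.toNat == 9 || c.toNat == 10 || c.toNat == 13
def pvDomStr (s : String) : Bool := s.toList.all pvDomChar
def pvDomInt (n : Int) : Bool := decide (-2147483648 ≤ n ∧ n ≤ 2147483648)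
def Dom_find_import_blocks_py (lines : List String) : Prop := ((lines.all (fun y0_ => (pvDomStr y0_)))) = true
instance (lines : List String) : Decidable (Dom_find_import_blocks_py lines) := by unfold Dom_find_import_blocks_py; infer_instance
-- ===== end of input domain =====

-- B replaces A's transition-detecting state machine with flag-list run-grouping (groupby); same O(n) cost, different decomposition.

-- ===== PORT A =====
-- shared line predicate: line.strip().startswith('import ') or line.strip().startswith('from ')
def pvIsImportLine (line : String) : Bool :=
  PySem.Str.startswith (PySem.Str.strip line) "import " ||
  PySem.Str.startswith (PySem.Str.strip line) "from "

-- the `for i, line in enumerate(lines)` loop as structural recursion carrying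
-- (blocks, in_block, block_start, i); the base case is the trailing `if in_block`
-- (there i = len(lines) since the scan starts at 0). block_start is an Option as in
-- Python (None initially); `.getD 0` extracts it — Python only reads it when in_block,
-- where it is always set, so the default is never the value used.
def pvLoopA (blocks : List (List (String × Int))) (in_block : Bool)
    (block_start : Option Int) (i : Int) : List String → List (List (String × Int))
  | [] =>
      if in_block then blocks ++ [[("start", block_start.getD 0), ("end", i)]] else blocks
  | line :: rest =>
      let is_import_line := pvIsImportLine line
      if is_import_line && !in_block then
        pvLoopA blocks true (some i) (i + 1) rest
      else if !is_import_line && in_block then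
        pvLoopA (blocks ++ [[("start", block_start.getD 0), ("end", i)]]) false block_start (i + 1) rest
      else
        pvLoopA blocks in_block block_start (i + 1) rest

def find_import_blocks_py (lines : List String) : List (List (String × Int)) :=
  pvLoopA [] false none 0 lines

-- ===== PORT B =====
-- itertools.groupby over the flag list, materialised as (key, run length) pairs,
-- left to right as groupby yields them.
def pvRunsGo (cur : Bool) (n : Nat) : List Bool → List (Bool × Nat)
  | [] => [(cur, n)]
  | b :: rest => if b = cur then pvRunsGo cur (n + 1) rest else (cur, n) :: pvRunsGo b 1 rest

def pvRuns : List Bool → List (Bool × Nat)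
  | [] => []
  | b :: rest => pvRunsGo b 1 rest

-- the `for key, group in groupby(flags)` loop: foldl over the runs with state (blocks, pos)
def find_import_blocks_py_alt (lines : List String) : List (List (String × Int)) :=
  let flags := lines.map pvIsImportLine
  ((pvRuns flags).foldl
    (fun (st : List (List (String × Int)) × Int) (g : Bool × Nat) =>
      ((if g.1 then st.1 ++ [[("start", st.2), ("end", st.2 + (g.2 : Int))]] else st.1),
        st.2 + (g.2 : Int)))
    ([], 0)).1

-- ===== PRECONDITION & SPEC =====
def Spec_find_import_blocks_py (lines : List String) (out : List (List (String × Int))) : Prop := out = find_import_blocks_py_alt lines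
instance (lines : List String) (out : List (List (String × Int))) : Decidable (Spec_find_import_blocks_py lines out) := by unfold Spec_find_import_blocks_py; infer_instance

-- ===== CLAIM (what is proved, stated in full; the proofs are below) =====
def Claim_equal_find_import_blocks_py : Prop := ∀ (lines : List String), Dom_find_import_blocks_py lines → Spec_find_import_blocks_py lines (find_import_blocks_py lines)

-- ===== LEMMAS AND PROOFS =====

-- reference emitter: processes the flag list one flag at a time with an optional pending start
def pvEmit : List Bool → Int → Option Int → List (List (String × Int)) → List (List (String × Int))
  | [], _, none, blocks => blocks
  | [], i, some s, blocks => blocks ++ [[("start", s), ("end", i)]]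
  | true :: fl, i, none, blocks => pvEmit fl (i + 1) (some i) blocks
  | true :: fl, i, some s, blocks => pvEmit fl (i + 1) (some s) blocks
  | false :: fl, i, none, blocks => pvEmit fl (i + 1) none blocks
  | false :: fl, i, some s, blocks => pvEmit fl (i + 1) none (blocks ++ [[("start", s), ("end", i)]])

def pvStepB (st : List (List (String × Int)) × Int) (g : Bool × Nat) :
    List (List (String × Int)) × Int :=
  ((if g.1 then st.1 ++ [[("start", st.2), ("end", st.2 + (g.2 : Int))]] else st.1),
    st.2 + (g.2 : Int))

-- A's loop equals the reference emitter (block_start irrelevant when not in a block)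
theorem pvLoopA_eq_emit : ∀ (lines : List String),
    (∀ (i : Int) (blocks : List (List (String × Int))) (bs : Option Int),
      pvLoopA blocks false bs i lines = pvEmit (lines.map pvIsImportLine) i none blocks) ∧
    (∀ (i : Int) (blocks : List (List (String × Int))) (s : Int),
      pvLoopA blocks true (some s) i lines = pvEmit (lines.map pvIsImportLine) i (some s) blocks) := by
  intro lines
  induction lines with
  | nil => constructor <;> intro i blocks bs <;> simp [pvLoopA, pvEmit]
  | cons line rest ih =>
    refine ⟨fun i blocks bs => ?_, fun i blocks s => ?_⟩
    · cases h : pvIsImportLine line <;>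
        simp [pvLoopA, pvEmit, h, ih.1, ih.2]
    · cases h : pvIsImportLine line <;>
        simp [pvLoopA, pvEmit, h, ih.1, ih.2]

-- B's fold over a run-in-progress equals the reference emitter
theorem pvFold_go_eq_emit : ∀ (rest : List Bool) (cur : Bool) (n : Nat)
    (blocks : List (List (String × Int))) (pos : Int),
    ((pvRunsGo cur n rest).foldl pvStepB (blocks, pos)).1 =
      (if cur then pvEmit rest (pos + (n : Int)) (some pos) blocks
       else pvEmit rest (pos + (n : Int)) none blocks) := by
  intro rest
  induction rest with
  | nil =>
    intro cur n blocks pos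
    cases cur <;> simp [pvRunsGo, pvStepB, pvEmit]
  | cons b r ih =>
    intro cur n blocks pos
    by_cases hb : b = cur
    · subst hb
      rw [pvRunsGo, if_pos rfl, ih]
      cases b <;> simp only [pvEmit] <;> push_cast <;> rw [← add_assoc]
    · rw [pvRunsGo, if_neg hb]
      cases cur
      · have hb' : b = true := by cases b <;> simp_all
        subst hb'
        simp only [List.foldl_cons, pvStepB, if_neg Bool.false_ne_true, ih, pvEmit]
        simp
      · have hb' : b = false := by cases b <;> simp_all
        subst hb'
        simp only [List.foldl_cons, pvStepB, ih, pvEmit]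
        simp

theorem find_import_blocks_py_eq : ∀ (lines : List String),
    find_import_blocks_py lines = find_import_blocks_py_alt lines := by
  intro lines
  rw [find_import_blocks_py, (pvLoopA_eq_emit lines).1 0 [] none]
  rw [find_import_blocks_py_alt]
  cases h : lines.map pvIsImportLine with
  | nil => simp [pvRuns, pvEmit]
  | cons b fl =>
    simp only [pvRuns]
    have := pvFold_go_eq_emit fl b 1 [] 0
    cases b <;> simp_all [pvEmit] <;> exact this.symm

-- ===== VERDICT (by name: the statement is the Claim_ definition above) =====
theorem find_import_blocks_py_spec : Claim_equal_find_import_blocks_py := by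
  intro lines _
  exact find_import_blocks_py_eq lines
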